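-- pv_equiv track=rewrite | github.com/SM-sandbox/ragas | scripts/generate_checkpoint_report.py | get_breakdown_by_difficulty
-- ===== SOURCE A (Python) =====
-- from collections import defaultdict
--
-- def get_breakdown_by_difficulty(results: list) -> dict:
--     """Get pass/fail breakdown by difficulty."""
--     by_diff = defaultdict(lambda: {"total": 0, "pass": 0, "partial": 0, "fail": 0})
--
--     for r in results:
--         diff = r.get("difficulty", "unknown")
--         verdict = r.get("verdict", "").lower()
--         by_diff[diff]["total"] += 1
--         if verdict == "pass":
--             by_diff[diff]["pass"] += 1
--         elif verdict == "partial":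
--             by_diff[diff]["partial"] += 1
--         elif verdict == "fail":
--             by_diff[diff]["fail"] += 1
--
--     return dict(by_diff)
-- ===== SOURCE B (Python) =====
-- def get_breakdown_by_difficulty(results: list) -> dict:
--     """Get pass/fail breakdown by difficulty."""
--     groups = {}
--     for r in results:
--         groups.setdefault(r.get("difficulty", "unknown"), []).append(
--             r.get("verdict", "").lower()
--         )
--     return {
--         diff: {
--             "total": len(vs),
--             "pass": vs.count("pass"),
--             "partial": vs.count("partial"),
--             "fail": vs.count("fail"),
--         }
--         for diff, vs in groups.items()
--     }
-- ===== Notes on version B (the rewrite author's own statement) =====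
-- stated objective: alternative
-- what changed: Replaces A's single-pass defaultdict of inline counter increments by a two-phase group-then-summarize structure: first pass groups the lowercased verdict strings per difficulty, second pass builds each summary from the group's length and list.count of the three named verdicts.
import Mathlib
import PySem

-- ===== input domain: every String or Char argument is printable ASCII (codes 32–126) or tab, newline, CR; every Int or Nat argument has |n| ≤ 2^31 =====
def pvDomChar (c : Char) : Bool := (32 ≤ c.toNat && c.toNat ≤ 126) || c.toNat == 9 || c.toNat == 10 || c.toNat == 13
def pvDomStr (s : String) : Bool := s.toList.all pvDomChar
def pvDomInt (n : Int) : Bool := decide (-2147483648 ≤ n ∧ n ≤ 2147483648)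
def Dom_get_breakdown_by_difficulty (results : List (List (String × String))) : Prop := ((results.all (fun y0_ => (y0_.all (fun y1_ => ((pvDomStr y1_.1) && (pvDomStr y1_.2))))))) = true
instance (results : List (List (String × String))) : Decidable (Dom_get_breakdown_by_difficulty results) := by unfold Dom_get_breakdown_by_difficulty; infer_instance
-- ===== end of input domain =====

-- B replaces A's single-pass defaultdict of inline counter increments by a two-phase
-- group-then-summarize decomposition (objective: alternative; same cost).

-- ===== PORT A =====
-- the defaultdict's default factory
def pyDefault0 : PySem.Dict String Int :=
  PySem.Dict.ofList [("total", 0), ("pass", 0), ("partial", 0), ("fail", 0)]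

-- body of A's for-loop (defaultdict access-and-update = Dict.modify with the default)
def pvStepA (by_diff : PySem.Dict String (PySem.Dict String Int))
    (r : List (String × String)) : PySem.Dict String (PySem.Dict String Int) :=
  let rd := PySem.Dict.ofList r
  let diff := rd.getD "difficulty" "unknown"
  let verdict := PySem.Str.lower (rd.getD "verdict" "")
  let by_diff := by_diff.modify diff pyDefault0 (fun m => m.modify "total" 0 (· + 1))
  if verdict == "pass" then
    by_diff.modify diff pyDefault0 (fun m => m.modify "pass" 0 (· + 1))
  else if verdict == "partial" then
    by_diff.modify diff pyDefault0 (fun m => m.modify "partial" 0 (· + 1))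
  else if verdict == "fail" then
    by_diff.modify diff pyDefault0 (fun m => m.modify "fail" 0 (· + 1))
  else by_diff

def get_breakdown_by_difficulty (results : List (List (String × String))) : List (String × List (String × Int)) :=
  (results.foldl pvStepA PySem.Dict.empty).items.map (fun p => (p.1, p.2.items))

-- ===== PORT B =====
-- the summary dict built for one group (second phase of Source B)
def pvSumm (vs : List String) : List (String × Int) :=
  [("total", (vs.length : Int)), ("pass", (vs.count "pass" : Int)),
   ("partial", (vs.count "partial" : Int)), ("fail", (vs.count "fail" : Int))]

-- body of Source B's grouping loop: groups.setdefault(diff, []).append(verdict)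
def pvStepB (g : PySem.Dict String (List String))
    (r : List (String × String)) : PySem.Dict String (List String) :=
  let rd := PySem.Dict.ofList r
  g.modify (rd.getD "difficulty" "unknown") []
    (fun vs => vs ++ [PySem.Str.lower (rd.getD "verdict" "")])

def get_breakdown_by_difficulty_alt (results : List (List (String × String))) : List (String × List (String × Int)) :=
  let groups := results.foldl pvStepB PySem.Dict.empty
  groups.items.map (fun p => (p.1, pvSumm p.2))

-- ===== PRECONDITION & SPEC =====
def Spec_get_breakdown_by_difficulty (results : List (List (String × String))) (out : List (String × List (String × Int))) : Prop := out = get_breakdown_by_difficulty_alt results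
instance (results : List (List (String × String))) (out : List (String × List (String × Int))) : Decidable (Spec_get_breakdown_by_difficulty results out) := by unfold Spec_get_breakdown_by_difficulty; infer_instance

-- ===== CLAIM (what is proved, stated in full; the proofs are below) =====
def Claim_equal_get_breakdown_by_difficulty : Prop := ∀ (results : List (List (String × String))), Dom_get_breakdown_by_difficulty results → Spec_get_breakdown_by_difficulty results (get_breakdown_by_difficulty results)

-- ===== LEMMAS AND PROOFS =====

-- A's key and lowercased verdict for one record
def pvKey (r : List (String × String)) : String :=
  (PySem.Dict.ofList r).getD "difficulty" "unknown"
def pvVerd (r : List (String × String)) : String :=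
  PySem.Str.lower ((PySem.Dict.ofList r).getD "verdict" "")

-- the inner-dict update A performs for one record with verdict v
def pvInner (v : String) (m : PySem.Dict String Int) : PySem.Dict String Int :=
  let m1 := m.modify "total" 0 (· + 1)
  if v == "pass" then m1.modify "pass" 0 (· + 1)
  else if v == "partial" then m1.modify "partial" 0 (· + 1)
  else if v == "fail" then m1.modify "fail" 0 (· + 1)
  else m1

def summDict (vs : List String) : PySem.Dict String Int := PySem.Dict.mk (pvSumm vs)

def mapVals (g : PySem.Dict String (List String)) : PySem.Dict String (PySem.Dict String Int) :=
  PySem.Dict.mk (g.items.map (fun p => (p.1, summDict p.2)))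

theorem stepA_eq (d : PySem.Dict String (PySem.Dict String Int)) (r : List (String × String)) :
    pvStepA d r = d.insert (pvKey r) (pvInner (pvVerd r) (d.getD (pvKey r) pyDefault0)) := by
  simp only [pvStepA, pvKey, pvVerd, pvInner, PySem.Dict.modify]
  split_ifs <;>
    simp [PySem.Dict.getD_insert_self, PySem.Dict.insert_insert_self]

theorem stepB_eq (g : PySem.Dict String (List String)) (r : List (String × String)) :
    pvStepB g r = g.insert (pvKey r) (g.getD (pvKey r) [] ++ [pvVerd r]) := by
  simp only [pvStepB, pvKey, pvVerd, PySem.Dict.modify]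

theorem contains_mapVals (g : PySem.Dict String (List String)) (k : String) :
    (mapVals g).contains k = g.contains k := by
  simp only [mapVals, PySem.Dict.contains, List.any_map]
  rfl

theorem mapVals_insert (g : PySem.Dict String (List String)) (k : String) (w : List String) :
    mapVals (g.insert k w) = (mapVals g).insert k (summDict w) := by
  apply PySem.Dict.ext
  have hitems : (mapVals (g.insert k w)).items =
      (g.insert k w).items.map (fun p => (p.1, summDict p.2)) := rfl
  by_cases h : g.contains k = true
  · rw [hitems, PySem.Dict.items_insert_of_contains _ _ h,
      PySem.Dict.items_insert_of_contains _ _ (by rwa [contains_mapVals])]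
    simp only [mapVals, List.map_map]
    apply List.map_congr_left
    intro p _
    by_cases hp : (p.1 == k) = true <;> simp [Function.comp, hp]
  · rw [hitems, PySem.Dict.items_insert_of_not_contains _ _ (by simpa using h),
      PySem.Dict.items_insert_of_not_contains _ _ (by rw [contains_mapVals]; simpa using h)]
    simp [mapVals]

theorem get?_mapVals (g : PySem.Dict String (List String)) (k : String) :
    (mapVals g).get? k = (g.get? k).map summDict := by
  simp only [mapVals, PySem.Dict.get?, List.find?_map]
  have : (fun p : String × PySem.Dict String Int => p.1 == k) ∘
      (fun p : String × List String => (p.1, summDict p.2)) =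
      (fun p : String × List String => p.1 == k) := rfl
  rw [this]
  cases List.find? (fun p : String × List String => p.1 == k) g.items <;> rfl

theorem getD_mapVals (g : PySem.Dict String (List String)) (k : String) :
    (mapVals g).getD k pyDefault0 = summDict (g.getD k []) := by
  simp only [PySem.Dict.getD, get?_mapVals]
  cases g.get? k <;> rfl

theorem inner_summ (v : String) (vs : List String) :
    pvInner v (summDict vs) = summDict (vs ++ [v]) := by
  simp only [pvInner, summDict, pvSumm, PySem.Dict.modify, PySem.Dict.insert,
    PySem.Dict.getD, PySem.Dict.get?, PySem.Dict.contains]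
  by_cases h1 : v = "pass"
  · subst h1; apply PySem.Dict.ext; simp
  · by_cases h2 : v = "partial"
    · subst h2; apply PySem.Dict.ext; simp
    · by_cases h3 : v = "fail"
      · subst h3; apply PySem.Dict.ext; simp [h1]
      · have b1 : (v == "pass") = false := by simp [h1]
        have b2 : (v == "partial") = false := by simp [h2]
        have b3 : (v == "fail") = false := by simp [h3]
        apply PySem.Dict.ext
        simp [b1, b2, b3, h1, h2, h3, List.count_append]

theorem step_commute (g : PySem.Dict String (List String)) (r : List (String × String)) :
    pvStepA (mapVals g) r = mapVals (pvStepB g r) := by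
  rw [stepA_eq, stepB_eq, mapVals_insert, getD_mapVals, inner_summ]

theorem fold_commute (results : List (List (String × String)))
    (g : PySem.Dict String (List String)) :
    results.foldl pvStepA (mapVals g) = mapVals (results.foldl pvStepB g) := by
  induction results generalizing g with
  | nil => rfl
  | cons r rs ih => simp only [List.foldl_cons, step_commute, ih]

-- ===== VERDICT (by name: the statement is the Claim_ definition above) =====
theorem get_breakdown_by_difficulty_spec : Claim_equal_get_breakdown_by_difficulty := by
  intro results _
  show get_breakdown_by_difficulty results = get_breakdown_by_difficulty_alt results
  unfold get_breakdown_by_difficulty get_breakdown_by_difficulty_alt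
  rw [show (PySem.Dict.empty : PySem.Dict String (PySem.Dict String Int)) =
      mapVals PySem.Dict.empty from rfl, fold_commute]
  simp only [mapVals, List.map_map]
  rfl
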